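-- pv_equiv track=rewrite | github.com/pypi-data/pypi-mirror-398 | packages/dp-fusion-lib/dp_fusion_lib-0.1.0.tar.gz/dp_fusion_lib-0.1.0/src/dp_fusion_lib/tagger.py | find_phrase_offsets
-- ===== SOURCE A (Python) =====
-- from typing import List
--
-- def find_phrase_offsets(text: str, phrases: List[str]) -> List[List[int]]:
--     """
--     Find all occurrences of phrases in text and return [start, end] offsets.
--
--     Args:
--         text: The full text to search in
--         phrases: List of phrases to find
--
--     Returns:
--         List of [start_char, end_char] offsets for all phrase occurrences
--     """
--     offsets = []
--     for phrase in phrases: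
--         start = 0
--         while True:
--             idx = text.find(phrase, start)
--             if idx == -1:
--                 break
--             offsets.append([idx, idx + len(phrase)])
--             start = idx + 1
--     return offsets
-- ===== SOURCE B (Python) =====
-- from typing import List
--
-- def find_phrase_offsets(text: str, phrases: List[str]) -> List[List[int]]:
--     """Scan every candidate start position once per phrase and compare slices."""
--     n = len(text)
--     offsets = []
--     for phrase in phrases:
--         m = len(phrase)
--         offsets.extend([i, i + m] for i in range(n - m + 1) if text[i:i + m] == phrase)
--     return offsets
-- ===== Notes on version B (the rewrite author's own statement) =====
-- stated objective: alternative
-- what changed: Replaces A's per-phrase repeated text.find(phrase, start) resumption loop by a single left-to-right scan over all candidate start positions per phrase with a direct slice comparison (one comprehension, no find/restart state).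
import Mathlib
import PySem

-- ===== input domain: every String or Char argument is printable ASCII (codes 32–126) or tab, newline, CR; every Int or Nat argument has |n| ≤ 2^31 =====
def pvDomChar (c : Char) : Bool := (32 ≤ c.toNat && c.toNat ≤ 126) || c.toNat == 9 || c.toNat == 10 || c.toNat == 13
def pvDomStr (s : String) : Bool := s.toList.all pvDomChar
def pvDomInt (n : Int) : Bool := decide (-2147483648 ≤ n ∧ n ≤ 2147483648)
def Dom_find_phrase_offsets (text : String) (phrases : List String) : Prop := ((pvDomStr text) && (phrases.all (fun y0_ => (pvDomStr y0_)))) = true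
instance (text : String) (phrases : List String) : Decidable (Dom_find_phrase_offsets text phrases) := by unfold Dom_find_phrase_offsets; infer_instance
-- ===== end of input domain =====

-- B replaces A's repeated `text.find(phrase, start)` resumption loop by a single left-to-right
-- scan of every candidate start position with a slice comparison (objective: alternative).

-- ===== PORT A =====

-- CPython quirk kept by PySem: s.find(sub, start) is -1 once start exceeds len(s).
theorem fpoFindFrom_gt (t p : List Char) (k : Nat) (h : t.length < k) :
    PySem.Chars.findFrom t p (k : Int) none = -1 := by
  simp only [PySem.Chars.findFrom]
  split_ifs with h1 h2 <;> try rfl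
  all_goals omega

-- bounds of a successful find, used for termination of the while-loop below
theorem fpoFindFrom_bounds (t p : List Char) (k : Nat)
    (h : PySem.Chars.findFrom t p (k : Int) none ≠ -1) :
    (k : Int) ≤ PySem.Chars.findFrom t p (k : Int) none ∧
      PySem.Chars.findFrom t p (k : Int) none ≤ (t.length : Int) := by
  by_cases hk : k ≤ t.length
  · refine ⟨(PySem.Chars.findFrom_natCast_spec t p k hk h).1, ?_⟩
    rw [PySem.Chars.findFrom_natCast t p k hk] at h ⊢
    split_ifs at h ⊢ with h1
    · omega
    · have := PySem.Chars.find_le_length (List.drop k t) p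
      simp [List.length_drop] at this
      omega
  · exact absurd (fpoFindFrom_gt t p k (by omega)) h

-- the inner `while True: idx = text.find(phrase, start); …; start = idx + 1` loop of A
def fpoLoop (t p : List Char) (start : Nat) : List (List Int) :=
  let idx := PySem.Chars.findFrom t p (start : Int) none
  if h : idx = -1 then []
  else [idx, idx + (p.length : Int)] :: fpoLoop t p (idx.toNat + 1)
termination_by t.length + 1 - start
decreasing_by
  have hb := fpoFindFrom_bounds t p start h
  omega

def find_phrase_offsets (text : String) (phrases : List String) : List (List Int) :=
  phrases.foldl (fun offsets phrase => offsets ++ fpoLoop text.toList phrase.toList 0) []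

-- ===== PORT B =====

-- B's per-phrase comprehension: [[i, i+m] for i in range(n-m+1) if text[i:i+m] == phrase]
def altMatches (t p : List Char) : List (List Int) :=
  ((PySem.List.pyRange 0 ((t.length : Int) - p.length + 1)).filter
      (fun i => PySem.List.slice t (some i) (some (i + p.length)) == p)).map
    (fun i => [i, i + (p.length : Int)])

def find_phrase_offsets_alt (text : String) (phrases : List String) : List (List Int) :=
  phrases.foldl (fun offsets phrase => offsets ++ altMatches text.toList phrase.toList) []

-- ===== PRECONDITION & SPEC =====
def Spec_find_phrase_offsets (text : String) (phrases : List String) (out : List (List Int)) : Prop := out = find_phrase_offsets_alt text phrases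
instance (text : String) (phrases : List String) (out : List (List Int)) : Decidable (Spec_find_phrase_offsets text phrases out) := by unfold Spec_find_phrase_offsets; infer_instance

-- ===== CLAIM (what is proved, stated in full; the proofs are below) =====
def Claim_equal_find_phrase_offsets : Prop := ∀ (text : String) (phrases : List String), Dom_find_phrase_offsets text phrases → Spec_find_phrase_offsets text phrases (find_phrase_offsets text phrases)

-- ===== LEMMAS AND PROOFS =====

-- canonical form both ports are reduced to: all match positions in [s, len], in order
def fpoCanon (t p : List Char) (s : Nat) : List (List Int) :=
  ((List.range' s (t.length + 1 - s)).filter (fun i => decide (p <+: t.drop i))).map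
    (fun (i : Nat) => ([(i : Int), (i : Int) + (p.length : Int)] : List Int))

theorem fpoNoPrefix_of_not_infix (t p : List Char) (s i : Nat) (hsi : s ≤ i)
    (h : ¬ p <:+: t.drop s) : ¬ p <+: t.drop i := by
  intro hp
  have hd : List.drop i t = List.drop (i - s) (List.drop s t) := by
    rw [List.drop_drop]
    congr 1
    omega
  rw [hd] at hp
  exact h (hp.isInfix.trans (List.drop_suffix (i - s) (List.drop s t)).isInfix)

theorem fpoCanon_nil (t p : List Char) (s : Nat) (_hs : s ≤ t.length)
    (h : ¬ p <:+: t.drop s) : fpoCanon t p s = [] := by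
  unfold fpoCanon
  have hf : (List.range' s (t.length + 1 - s)).filter (fun i => decide (p <+: t.drop i)) = [] := by
    rw [List.filter_eq_nil_iff]
    intro i hi
    simp only [List.mem_range'] at hi
    obtain ⟨k, hk, rfl⟩ := hi
    simp only [decide_eq_true_eq]
    exact fpoNoPrefix_of_not_infix t p s (s + 1 * k) (by omega) h
  rw [hf, List.map_nil]

theorem fpoLoop_eq_canon (t p : List Char) :
    ∀ (d s : Nat), t.length + 1 - s ≤ d → fpoLoop t p s = fpoCanon t p s := by
  intro d
  induction d with
  | zero =>
    intro s hs
    have hgt : t.length < s := by omega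
    rw [fpoLoop]
    unfold fpoCanon
    rw [Nat.sub_eq_zero_of_le (by omega : t.length + 1 ≤ s)]
    simp [fpoFindFrom_gt t p s hgt]
  | succ d ih =>
    intro s hs
    rw [fpoLoop]
    by_cases h : PySem.Chars.findFrom t p (s : Int) none = -1
    · simp only [h, dif_pos]
      by_cases hsl : s ≤ t.length
      · exact (fpoCanon_nil t p s hsl
          ((PySem.Chars.findFrom_natCast_eq_neg_one_iff t p s hsl).mp h)).symm
      · unfold fpoCanon
        rw [Nat.sub_eq_zero_of_le (by omega : t.length + 1 ≤ s)]
        simp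
    · simp only [h, dif_neg, not_false_iff]
      have hb := fpoFindFrom_bounds t p s h
      set idx := PySem.Chars.findFrom t p (s : Int) none with hidx
      have hsl : s ≤ t.length := by
        by_contra hc
        exact h (fpoFindFrom_gt t p s (by omega))
      obtain ⟨hge, hpre, hmin⟩ := PySem.Chars.findFrom_natCast_spec t p s hsl h
      set j := idx.toNat with hj
      have hjl : j ≤ t.length := by omega
      have hjs : s ≤ j := by omega
      have hidxj : idx = (j : Int) := by omega
      -- split the canonical range at j
      have hsplit : List.range' s (t.length + 1 - s)
          = List.range' s (j - s) ++ j :: List.range' (j + 1) (t.length - j) := by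
        have h1 : List.range' s (j - s) ++ List.range' (s + 1 * (j - s)) ((t.length - j) + 1)
            = List.range' s ((j - s) + ((t.length - j) + 1)) := List.range'_append
        have h2 : s + 1 * (j - s) = j := by omega
        have h3 : (j - s) + ((t.length - j) + 1) = t.length + 1 - s := by omega
        rw [h2, h3] at h1
        rw [← h1, List.range'_succ]
      conv_rhs => rw [fpoCanon, hsplit]
      rw [List.filter_append, List.filter_cons]
      have hfilt1 : (List.range' s (j - s)).filter (fun i => decide (p <+: t.drop i)) = [] := by
        rw [List.filter_eq_nil_iff]
        intro i hi
        simp only [List.mem_range'] at hi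
        obtain ⟨k, hk, rfl⟩ := hi
        simp only [decide_eq_true_eq]
        exact hmin (s + 1 * k) (by omega) (by omega)
      have hcond : decide (p <+: t.drop j) = true := by simpa using hpre
      rw [hfilt1, hcond, if_pos rfl, List.nil_append, List.map_cons]
      have harg : t.length + 1 - (j + 1) = t.length - j := by omega
      rw [hidxj]
      congr 1
      rw [ih (j + 1) (by omega)]
      unfold fpoCanon
      rw [harg]

theorem fpoNotPrefix_of_big (t p : List Char) (i : Nat) (hp0 : 0 < p.length)
    (hi : t.length < i + p.length) :
    ¬ p <+: t.drop i := by
  intro hp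
  have := hp.length_le
  rw [List.length_drop] at this
  omega

theorem altMatches_eq_canon (t p : List Char) : altMatches t p = fpoCanon t p 0 := by
  unfold altMatches fpoCanon
  simp only [Nat.sub_zero]
  by_cases hm : p.length ≤ t.length + 1
  · -- the Int bound n - m + 1 is the Nat K = n + 1 - m
    have hK : (t.length : Int) - p.length + 1 = ((t.length + 1 - p.length : Nat) : Int) := by
      push_cast [Nat.cast_sub hm]
      ring
    set K := t.length + 1 - p.length with hKdef
    rw [hK, PySem.List.pyRange_zero_natCast, List.filter_map, List.map_map]
    -- predicates agree on every Nat index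
    have hpred : ∀ i ∈ List.range K,
        ((fun (x : Int) => PySem.List.slice t (some x) (some (x + p.length)) == p) ∘ (fun (k : Nat) => (k : Int))) i
          = (fun i => decide (p <+: t.drop i)) i := by
      intro i _
      simp only [Function.comp_apply]
      have hb : (i : Int) + p.length = ((i + p.length : Nat) : Int) := by push_cast; ring
      rw [hb, PySem.List.slice_natCast, Nat.add_sub_cancel_left]
      rw [Bool.beq_eq_decide_eq]
      simp only [decide_eq_decide]
      exact ⟨fun h => List.prefix_iff_eq_take.mpr h.symm, fun h => (List.prefix_iff_eq_take.mp h).symm⟩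
    rw [List.filter_congr hpred]
    -- the canonical range 0..t.length, filtered, loses nothing above K
    have hsplit : List.range' 0 (t.length + 1) = List.range K ++ List.range' K (t.length + 1 - K) := by
      rw [List.range_eq_range']
      have h2 : 0 + 1 * K = K := by omega
      have h3 : K + (t.length + 1 - K) = t.length + 1 := by omega
      have := List.range'_append (s := 0) (m := K) (n := t.length + 1 - K) (step := 1)
      rw [h2, h3] at this
      exact this.symm
    rw [hsplit, List.filter_append]
    have htail : (List.range' K (t.length + 1 - K)).filter (fun i => decide (p <+: t.drop i)) = [] := by
      rw [List.filter_eq_nil_iff]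
      intro i hi
      simp only [List.mem_range'] at hi
      obtain ⟨k, hk, rfl⟩ := hi
      simp only [decide_eq_true_eq]
      exact fpoNotPrefix_of_big t p (K + 1 * k) (by omega) (by omega)
    rw [htail, List.append_nil]
    simp [Function.comp]
  · -- phrase longer than the text: both sides are empty
    have h1 : PySem.List.pyRange 0 ((t.length : Int) - p.length + 1) = [] :=
      PySem.List.pyRange_one_eq_nil (by omega)
    have h2 : (List.range' 0 (t.length + 1)).filter (fun i => decide (p <+: t.drop i)) = [] := by
      rw [List.filter_eq_nil_iff]
      intro i hi
      simp only [List.mem_range'] at hi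
      obtain ⟨k, hk, rfl⟩ := hi
      simp only [decide_eq_true_eq]
      exact fpoNotPrefix_of_big t p (0 + 1 * k) (by omega) (by omega)
    rw [h1, h2]
    simp

theorem perPhrase (t p : List Char) : fpoLoop t p 0 = altMatches t p := by
  rw [altMatches_eq_canon]
  exact fpoLoop_eq_canon t p (t.length + 1) 0 (by omega)

-- ===== VERDICT (by name: the statement is the Claim_ definition above) =====
theorem find_phrase_offsets_spec : Claim_equal_find_phrase_offsets := by
  intro text phrases _
  unfold Spec_find_phrase_offsets find_phrase_offsets find_phrase_offsets_alt
  have hfun : (fun (offsets : List (List Int)) (phrase : String) => offsets ++ fpoLoop text.toList phrase.toList 0)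
      = (fun offsets phrase => offsets ++ altMatches text.toList phrase.toList) := by
    funext offsets phrase
    rw [perPhrase]
  rw [hfun]
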